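/- GENERATED by tools/from_farm_form.py from prooffarm-gif/accepted/digest_extensions.1/Proof.lean (a worked proof of the farm's unit `digest_extensions.1`,
   accepted by the verdict) — do not edit. -/
import Gif.Spec.Units.digest_extensions_1
import Gif.Spec.AllSegs

open X86 X86.User Asan ProgX.Base ProgX.Base.Spec Gif.Spec

set_option maxRecDepth 4000
set_option maxHeartbeats 4000000

/-- Segment 1 of `digest_extensions` (105660H … 105689H; gif_driver.c:130-136): the six pushes, `sub rsp, 8`, `r14d = count`,
`r15 = blocks`; `digest_int(h, count)` (it writes 16 bytes of stack below the return address at `[RA − 64, RA − 56)`), `rbx = rax`;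
`test r15, r15 ; je`: `blocks == NULL`: `Done` at 1056F0H; otherwise `ex = some x` (`ExtsAt none` says the pointer is 0), `r12d = 0`:
`Head x.blocks.length` at 10568DH. No check site, nothing stored but the function's 128 bytes of stack.
    BLOCKS: 1 the prelude, the walk to the return of `digest_int` (ret1)
            2 behind the call: the six saved registers and the return address through the callee's footprint, the function's own
              footprint, the heap's invariant under the lower stack pointer: THE HUB `At ret1` at the returned state
            3 the second walk to both exit cuts: nothing stored: `At` by `digest_extensions.At.carry` (Gif/Spec/DriverCarry.lean)
            4 the loop clauses of `Head`: the array is a heap object, above the stack (`Owns.inside`): `ExtsAt.frame` -/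
theorem Gif.Spec.Proved.digest_extensions_1_ok : Gif.Spec.digest_extensions_1.Statement := by
  intro Lay hLay μ hμ u₀ hcode h_int H rest frames ex e ret he hpre
  -- 1. THE PRELUDE: the entry, the pre (`HeapPre`, `ExtsAt`, `Owns`), kept whole for the assertion `At`
  have he0 := he
  have hpre0 := hpre
  v_entry he
  obtain ⟨hp, hexts, howns⟩ := hpre
  have hbase := hp.base
  have hlimit := hp.limit
  have hok := hp.inv.heap
  -- 0x105660 … 0x105674 (gif_driver.c:130-132): the pushes, the two moves, the call of digest_int
  u_walk hcode [hμ.vendor] until [Gif.L.digest_extensions.ret1]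
    span [ProgX.Base.L.textLo, ProgX.Base.L.textHi] side (v_side)
  case call_inv =>
    v_inv
  case pre_105674 =>
    trivial
  -- 2. 0x105679 (ret1, gif_driver.c:132): digest_int has returned; the six saved registers through its footprint
  v_after_call w_rsp_105674 w_mem_105674
  have hp15 : s_105674.mem.readLE (e.reg .rsp - 8) 8 = (e.reg .r15).toNat := by u_resolve
  rw [w_mem_105674] at hp15
  have hs15 : s_105674r.mem.readLE (e.reg .rsp - 8) 8 = (e.reg .r15).toNat := by u_frame hp15
  have hp14 : s_105674.mem.readLE (e.reg .rsp - 16) 8 = (e.reg .r14).toNat := by u_resolve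
  rw [w_mem_105674] at hp14
  have hs14 : s_105674r.mem.readLE (e.reg .rsp - 16) 8 = (e.reg .r14).toNat := by u_frame hp14
  have hp13 : s_105674.mem.readLE (e.reg .rsp - 24) 8 = (e.reg .r13).toNat := by u_resolve
  rw [w_mem_105674] at hp13
  have hs13 : s_105674r.mem.readLE (e.reg .rsp - 24) 8 = (e.reg .r13).toNat := by u_frame hp13
  have hp12 : s_105674.mem.readLE (e.reg .rsp - 32) 8 = (e.reg .r12).toNat := by u_resolve
  rw [w_mem_105674] at hp12
  have hs12 : s_105674r.mem.readLE (e.reg .rsp - 32) 8 = (e.reg .r12).toNat := by u_frame hp12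
  have hpbp : s_105674.mem.readLE (e.reg .rsp - 40) 8 = (e.reg .rbp).toNat := by u_resolve
  rw [w_mem_105674] at hpbp
  have hsbp : s_105674r.mem.readLE (e.reg .rsp - 40) 8 = (e.reg .rbp).toNat := by u_frame hpbp
  have hpbx : s_105674.mem.readLE (e.reg .rsp - 48) 8 = (e.reg .rbx).toNat := by u_resolve
  rw [w_mem_105674] at hpbx
  have hsbx : s_105674r.mem.readLE (e.reg .rsp - 48) 8 = (e.reg .rbx).toNat := by u_frame hpbx
  -- the return address: the pushes and the callee's frame lie below its slot
  have hpra : UInt64.ofNat (s_105674.mem.readLE (e.reg .rsp) 8) = ret := by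
    rw [w_mem_105674]
    u_frame he_retAddr
  rw [w_mem_105674] at hpra
  have hsra : UInt64.ofNat (s_105674r.mem.readLE (e.reg .rsp) 8) = ret := by u_frame hpra
  -- the function's own footprint so far (the contract's 128 bytes of stack); no shadow byte written
  have hsame : Mem.SameExcept [⟨(e.reg .rsp).toNat - 128, (e.reg .rsp).toNat⟩] e.mem s_105674r.mem := by u_same
  have hun : ShadowUntouched e.mem s_105674r.mem := by v_untouched
  -- the heap's invariant: the window lies below the heap's region; the stack pointer went down by 64 and came back by 8
  have hinv : HeapInv H rest frames ((e.reg .rsp).toNat - 56) s_105674r.mem := by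
    refine (hp.inv.sameExcept hun hsame ?_).lower (by omega) (by omega) (by omega)
    intro w hw
    have hw_eq := List.mem_singleton.mp hw
    rw [hw_eq, hbase]
    left
    left
    simp only
    omega
  -- THE HUB: the function's shared assertion at the returned state
  have hat1 : digest_extensions.At Gif.L.digest_extensions.ret1 H rest frames ex u₀ e ret s_105674r :=
    { entry := he0, pre := hpre0, rip := w_rip, rsp := w_rsp,
      slot_r15 := hs15, slot_r14 := hs14, slot_r13 := hs13, slot_r12 := hs12, slot_rbp := hsbp, slot_rbx := hsbx,
      slot_ra := hsra, inv := hinv, un := hun, same := hsame, code := w_code, abi := w_inv }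
  -- 3. 0x105679 … 0x105687 (gif_driver.c:132-136): `rbx = rax`, the NULL test, `i = 0`: to both exit cuts
  clear hp15 hp14 hp13 hp12 hpbp hpbx hpra w_same
  u_walk hcode [hμ.vendor] until [Gif.L.digest_extensions.at_10568d, Gif.L.digest_extensions.at_1056f0]
    span [ProgX.Base.L.textLo, ProgX.Base.L.textHi] side (v_side)
  · -- 0x10567f → 0x1056f0 (gif_driver.c:133): `blocks == NULL`, THE EXIT: `Done`; nothing was stored behind the call
    have hun2 : ShadowUntouched s_105674r.mem s_10567f.mem := by
      rw [w_mem]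
      exact Mem.EqOn.refl _ _ _
    have hsame2 : Mem.SameExcept [⟨(e.reg .rsp).toNat - 128, (e.reg .rsp).toNat - 48⟩] s_105674r.mem s_10567f.mem := by
      rw [w_mem]
      exact Mem.SameExcept.refl _ _
    have habi : (conv u₀).inv s_10567f := by v_inv
    have hat' := hat1.carry (cut' := Gif.L.digest_extensions.at_1056f0) w_rip w_rsp
      (ProgX.Base.conv_code_in w_eq) habi hun2 hsame2
    exact ReachVia.done (Or.inr ⟨hat'⟩)
  · -- 0x105687 → 0x10568d (gif_driver.c:136): `blocks != NULL`, `i = 0`: THE LOOP HEAD, `Head length`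
    have hun2 : ShadowUntouched s_105674r.mem s_105687.mem := by
      rw [w_mem]
      exact Mem.EqOn.refl _ _ _
    have hsame2 : Mem.SameExcept [⟨(e.reg .rsp).toNat - 128, (e.reg .rsp).toNat - 48⟩] s_105674r.mem s_105687.mem := by
      rw [w_mem]
      exact Mem.SameExcept.refl _ _
    have habi : (conv u₀).inv s_105687 := by v_inv
    have hat' := hat1.carry (cut' := Gif.L.digest_extensions.at_10568d) w_rip w_rsp
      (ProgX.Base.conv_code_in w_eq) habi hun2 hsame2
    cases ex with
    | none =>
      -- `ExtsAt none`: the pointer is 0: the branch was taken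
      exact absurd hexts.1 hbr_10567f
    | some x =>
      have hexts1 := hexts
      obtain ⟨k_arr, k_len, k_cap, _⟩ := hexts1
      -- where the array is: a heap object, above the stack
      have hin := howns.inside hok (o := (x.arr, 24 * x.cap)) List.mem_cons_self
      have harr_lo : H.base + 64 ≤ x.arr := hin.1
      have harr_hi : x.arr + 24 * x.cap + 32 ≤ 0xC00000 := hin.2.2.2.2
      clear hin
      rw [hbase] at harr_lo
      have hexts0 : ExtsAt (some x) x.arr x.blocks.length e.mem := by
        rw [← k_arr, ← k_len]
        exact hexts
      refine ReachVia.done (Or.inl ⟨x.blocks.length, hat', x, rfl, ?_, ?_, ?_, ?_, ?_⟩)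
      · -- r15 = blocks
        rw [w_r15]
        exact k_arr
      · -- the counted blocks in the present memory: the array is off the stack
        rw [w_mem]
        refine hexts0.frame ?_ ?_
        · intro o ho
          have ho_eq : o = (x.arr, 24 * x.blocks.length) := List.mem_singleton.mp ho
          rw [ho_eq]
          refine hsame.eqOn _ _ ?_
          intro w hw
          have hw_eq := List.mem_singleton.mp hw
          rw [hw_eq]
          right
          show (e.reg .rsp).toNat ≤ x.arr
          omega
        · intro y hy
          have hy_eq : x = y := Option.some.inj hy
          rw [← hy_eq]
          omega
      · -- r14 = count (`mov r14d, esi`: zero-extended)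
        rw [w_r14, toNat_ofBV32, toNat_part32]
        exact k_len
      · -- r12 = i = 0
        rw [w_r12]
        exact Nat.zero_le _
      · -- the measure: `length − 0`
        rw [w_r12]
        rfl
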